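-- pv_equiv track=rewrite | github.com/omurakazumasa/seq2seq | scripts/extract.py | cumsum
-- ===== SOURCE A (Python) =====
-- from typing import List, Tuple
--
-- def cumsum(partial_sequence: List[List],
--            l: int
--            ) -> List[int]:
--     mora_counts = []
--     count = 0
--     for i in range(l):
--         count += sum(analysis[1] for analysis in partial_sequence[i])
--         mora_counts.append(count)
--     # return the cumulative sum of mora
--     return mora_counts
-- ===== SOURCE B (Python) =====
-- def cumsum(partial_sequence, l):
--     # no running accumulator: the i-th entry is defined directly as the total
--     # mora count of the first i+1 sequences, recomputed from scratch each time
--     return [sum(a[1] for seq in partial_sequence[:i + 1] for a in seq)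
--             for i in range(l)]
-- ===== Notes on version B (the rewrite author's own statement) =====
-- stated objective: alternative
-- what changed: A's single stateful loop with a running count is replaced by a stateless closed-form comprehension: each output entry is recomputed directly as the flattened sum over the prefix partial_sequence[:i+1], trading O(total) for O(l*total) with no accumulator at all.
import Mathlib
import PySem

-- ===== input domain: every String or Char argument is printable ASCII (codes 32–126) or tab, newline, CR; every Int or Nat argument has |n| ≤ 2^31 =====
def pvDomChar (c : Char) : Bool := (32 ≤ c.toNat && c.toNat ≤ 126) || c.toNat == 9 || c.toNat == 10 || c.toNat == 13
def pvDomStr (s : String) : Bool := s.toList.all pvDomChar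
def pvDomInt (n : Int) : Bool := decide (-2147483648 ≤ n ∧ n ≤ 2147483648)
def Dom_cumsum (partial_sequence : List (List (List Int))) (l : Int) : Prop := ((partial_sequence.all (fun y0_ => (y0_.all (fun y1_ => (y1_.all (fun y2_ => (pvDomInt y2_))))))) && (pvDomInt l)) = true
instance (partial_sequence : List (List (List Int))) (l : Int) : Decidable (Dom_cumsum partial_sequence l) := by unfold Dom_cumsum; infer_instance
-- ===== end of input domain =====

-- B removes A's running accumulator entirely: each entry is recomputed directly as the
-- flattened sum over the prefix partial_sequence[:i+1] (stateless closed form, O(l*total)).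

-- ===== PORT A =====
-- one fused loop over range(l): index, sum analysis[1], accumulate, append
def cumsum (partial_sequence : List (List (List Int))) (l : Int) : List Int :=
  ((PySem.List.pyRange 0 l 1).foldl
    (fun (st : List Int × Int) i =>
      let c := st.2 + ((PySem.List.pyGetD partial_sequence i []).foldl
        (fun s analysis => s + PySem.List.pyGetD analysis 1 0) 0)
      (st.1 ++ [c], c))
    ([], 0)).1

-- ===== PORT B =====
-- sum(a[1] for seq in partial_sequence[:i+1] for a in seq): fold over the flattened prefix
def cumsum_alt (partial_sequence : List (List (List Int))) (l : Int) : List Int :=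
  (PySem.List.pyRange 0 l 1).map (fun i =>
    ((PySem.List.slice partial_sequence none (some (i + 1))).flatMap (fun seq => seq)).foldl
      (fun s a => s + PySem.List.pyGetD a 1 0) 0)

-- ===== PRECONDITION & SPEC =====
-- Pre_ excludes exactly the inputs where the Python A raises IndexError:
-- l beyond len(partial_sequence) (partial_sequence[i] out of range), or an analysis with
-- fewer than two fields inside the first l sequences (analysis[1] out of range).
def Pre_cumsum (partial_sequence : List (List (List Int))) (l : Int) : Prop :=
  l ≤ (partial_sequence.length : Int) ∧
  ∀ seq ∈ partial_sequence.take l.toNat, ∀ a ∈ seq, 2 ≤ a.length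
instance (partial_sequence : List (List (List Int))) (l : Int) : Decidable (Pre_cumsum partial_sequence l) := by unfold Pre_cumsum; infer_instance

def pvWitness_cumsum : List (List (List Int)) × Int := ([[[1, 2], [3, 4]], [[0, 5]]], 2)

def Spec_cumsum (partial_sequence : List (List (List Int))) (l : Int) (out : List Int) : Prop := out = cumsum_alt partial_sequence l
instance (partial_sequence : List (List (List Int))) (l : Int) (out : List Int) : Decidable (Spec_cumsum partial_sequence l out) := by unfold Spec_cumsum; infer_instance

-- ===== CLAIM =====
def Claim_equal_cumsum : Prop := ∀ (partial_sequence : List (List (List Int))) (l : Int), Dom_cumsum partial_sequence l → Pre_cumsum partial_sequence l → Spec_cumsum partial_sequence l (cumsum partial_sequence l)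

-- ===== LEMMAS AND PROOFS =====

-- prefix total: the mora count of the first k sequences, as B computes it
def prefTotal (ps : List (List (List Int))) (k : Nat) : Int :=
  ((ps.take k).flatMap (fun seq => seq)).foldl (fun s a => s + PySem.List.pyGetD a 1 0) 0

lemma prefTotal_succ (ps : List (List (List Int))) (m : Nat) (hm : m < ps.length) :
    prefTotal ps (m + 1)
      = prefTotal ps m + ps[m].foldl (fun s a => s + PySem.List.pyGetD a 1 0) 0 := by
  unfold prefTotal
  have htake : ps.take (m + 1) = ps.take m ++ [ps[m]] := by
    rw [List.take_succ, List.getElem?_eq_getElem hm]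
    rfl
  rw [htake, List.flatMap_append, List.foldl_append]
  simp [PySem.List.foldl_add]

-- A's fused loop over the first n sequences yields the list of prefix totals
lemma cumsum_fold_eq (ps : List (List (List Int))) (n : Nat) (hn : n ≤ ps.length) :
    (PySem.List.pyRange 0 (n : Int) 1).foldl
      (fun (st : List Int × Int) i =>
        let c := st.2 + ((PySem.List.pyGetD ps i []).foldl
          (fun s analysis => s + PySem.List.pyGetD analysis 1 0) 0)
        (st.1 ++ [c], c))
      ([], 0)
    = ((List.range n).map (fun k => prefTotal ps (k + 1)), prefTotal ps n) := by
  induction n with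
  | zero => simp [PySem.List.pyRange_one_eq_nil, prefTotal]
  | succ m ih =>
    have hm : m ≤ ps.length := Nat.le_of_succ_le hn
    have hlt : m < ps.length := hn
    have hcast : ((m + 1 : Nat) : Int) = (m : Int) + 1 := by push_cast; ring
    rw [hcast, PySem.List.pyRange_one_succ_right (by positivity),
        List.foldl_append, ih hm]
    simp only [List.foldl_cons, List.foldl_nil, List.range_succ, List.map_append, List.map]
    rw [prefTotal_succ ps m hlt]
    simp [PySem.List.pyGetD_natCast, List.getD, List.getElem?_eq_getElem hlt]

-- ===== VERDICT =====
theorem cumsum_spec : Claim_equal_cumsum := by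
  intro ps l _ hpre
  unfold Spec_cumsum cumsum cumsum_alt
  rcases le_or_gt l 0 with hl | hl
  · simp [PySem.List.pyRange_one_eq_nil hl]
  · have hle : l.toNat ≤ ps.length := by
      have := hpre.1; omega
    have hln : (l.toNat : Int) = l := Int.toNat_of_nonneg (le_of_lt hl)
    have h := cumsum_fold_eq ps l.toNat hle
    rw [hln] at h
    rw [h]
    rw [PySem.List.pyRange_one 0 l]
    simp only [List.map_map, sub_zero, zero_add]
    apply List.map_congr_left
    intro k _
    have hk : ((k : Int) + 1) = ((k + 1 : Nat) : Int) := by push_cast; ring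
    simp only [Function.comp_apply, hk, PySem.List.slice_to_natCast]
    rfl
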